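-- pv_equiv track=rewrite | github.com/mohammadfaiizan/ProjectI | DSA/Problem/Graph/07_Topological_Sort_DAG/1591_Strange_Printer_II.py | isPrintable_topological_sort
-- ===== SOURCE A (Python) =====
-- from typing import List, Set, Dict, Tuple
-- from collections import defaultdict, deque
--
-- def isPrintable_topological_sort(targetGrid: List[List[int]]) -> bool:
--     """
--     Approach 1: Topological Sort with Color Dependencies
--
--     Build dependency graph between colors and check for cycles.
--
--     Time: O(m*n + C²), Space: O(C²) where C is number of colors
--     """
--     if not targetGrid or not targetGrid[0]:
--         return True
--
--     m, n = len(targetGrid), len(targetGrid[0])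
--
--     # Find bounding box for each color
--     color_bounds = {}
--     for i in range(m):
--         for j in range(n):
--             color = targetGrid[i][j]
--             if color not in color_bounds:
--                 color_bounds[color] = [i, i, j, j]  # top, bottom, left, right
--             else:
--                 bounds = color_bounds[color]
--                 bounds[0] = min(bounds[0], i)  # top
--                 bounds[1] = max(bounds[1], i)  # bottom
--                 bounds[2] = min(bounds[2], j)  # left
--                 bounds[3] = max(bounds[3], j)  # right
--
--     # Build dependency graph
--     graph = defaultdict(set)
--     in_degree = defaultdict(int)
--     colors = set(color_bounds.keys())
--
--     for color in colors:
--         in_degree[color] = 0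
--
--     # For each color, check what other colors are in its bounding box
--     for color, (top, bottom, left, right) in color_bounds.items():
--         overlapping_colors = set()
--
--         for i in range(top, bottom + 1):
--             for j in range(left, right + 1):
--                 if targetGrid[i][j] != color:
--                     overlapping_colors.add(targetGrid[i][j])
--
--         # Color must be printed before all overlapping colors
--         for other_color in overlapping_colors:
--             if other_color not in graph[color]:
--                 graph[color].add(other_color)
--                 in_degree[other_color] += 1
--
--     # Topological sort using Kahn's algorithm
--     queue = deque()
--     for color in colors:
--         if in_degree[color] == 0:
--             queue.append(color)
--
--     processed = 0
--     while queue: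
--         color = queue.popleft()
--         processed += 1
--
--         for neighbor in graph[color]:
--             in_degree[neighbor] -= 1
--             if in_degree[neighbor] == 0:
--                 queue.append(neighbor)
--
--     return processed == len(colors)
-- ===== SOURCE B (Python) =====
-- def isPrintable_topological_sort(targetGrid):
--     """
--     Alternative: same bounding boxes, but decide printability by saturating the
--     set of printable colors (repeatedly admit any color none of whose
--     predecessors is missing) instead of Kahn's queue/in-degree topological sort.
--     """
--     if not targetGrid or not targetGrid[0]:
--         return True
--
--     m, n = len(targetGrid), len(targetGrid[0])
--
--     boxes = {}
--     for i in range(m):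
--         for j in range(n):
--             c = targetGrid[i][j]
--             t, b, l, r = boxes.get(c, (i, i, j, j))
--             boxes[c] = (min(t, i), max(b, i), min(l, j), max(r, j))
--
--     def blocked(v, done):
--         # v is blocked while some other not-yet-printed color's box contains a v-cell
--         for c, (t, b, l, r) in boxes.items():
--             if c != v and c not in done:
--                 if any(targetGrid[i][j] == v
--                        for i in range(t, b + 1) for j in range(l, r + 1)):
--                     return True
--         return False
--
--     done = set()
--     changed = True
--     while changed:
--         changed = False
--         for v in boxes:
--             if v not in done and not blocked(v, done):
--                 done.add(v)
--                 changed = True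
--     return len(done) == len(boxes)
-- ===== Notes on version B (the rewrite author's own statement) =====
-- stated objective: alternative
-- what changed: Kahn's queue/in-degree topological sort over an explicitly built color dependency graph is replaced by fixpoint saturation: repeatedly admit any color whose every predecessor (a color whose bounding box contains one of its cells) is already admitted, with no graph, no in-degree counters and no queue; printable iff the saturated set covers all colors.
import Mathlib
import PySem

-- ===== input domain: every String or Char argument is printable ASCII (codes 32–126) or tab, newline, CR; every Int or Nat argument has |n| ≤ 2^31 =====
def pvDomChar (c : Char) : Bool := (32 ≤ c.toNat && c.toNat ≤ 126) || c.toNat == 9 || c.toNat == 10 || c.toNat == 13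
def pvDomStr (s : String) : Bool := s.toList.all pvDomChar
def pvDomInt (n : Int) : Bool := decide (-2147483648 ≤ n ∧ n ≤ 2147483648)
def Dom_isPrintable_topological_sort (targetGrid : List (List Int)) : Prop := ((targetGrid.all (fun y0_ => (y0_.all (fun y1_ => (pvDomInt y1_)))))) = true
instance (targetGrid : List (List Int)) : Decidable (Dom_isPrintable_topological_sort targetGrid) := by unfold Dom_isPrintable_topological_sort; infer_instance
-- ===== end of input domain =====

-- B replaces Kahn's queue/in-degree topological sort by fixpoint saturation of the
-- set of printable colors (alternative decomposition, no speed claim).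

-- ===== PORT A =====
-- targetGrid[i][j]; every access is at 0 ≤ i < m, 0 ≤ j < n, in range under Pre_,
-- so the total pyGetD form is exact there.
def pvCell (g : List (List Int)) (i j : Int) : Int :=
  PySem.List.pyGetD (PySem.List.pyGetD g i []) j 0

-- first pass of A: the bounding box of every color (dict insert-or-update)
def pvBoundsA (g : List (List Int)) (m n : Int) : PySem.Dict Int (Int × Int × Int × Int) :=
  (PySem.List.pyRange 0 m 1).foldl (fun cb i =>
    (PySem.List.pyRange 0 n 1).foldl (fun cb j =>
      let color := pvCell g i j
      cb.insert color (match cb.get? color with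
        | none => (i, i, j, j)
        | some (t, b, l, r) => (min t i, max b i, min l j, max r j))) cb)
    PySem.Dict.empty

-- second pass of A: dependency graph and in-degrees.  Python's graph is a
-- defaultdict(set): reads are modelled by getD (the empty entries a bare read
-- would create are never observed by the result).
def pvGraphA (g : List (List Int)) (cb : PySem.Dict Int (Int × Int × Int × Int))
    (ind0 : PySem.Dict Int Int) : PySem.Dict Int (PySem.Set Int) × PySem.Dict Int Int :=
  cb.items.foldl (fun gi p =>
    let color := p.1
    let overlapping : PySem.Set Int :=
      (PySem.List.pyRange p.2.1 (p.2.2.1 + 1) 1).foldl (fun s i =>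
        (PySem.List.pyRange p.2.2.2.1 (p.2.2.2.2 + 1) 1).foldl (fun s j =>
          if pvCell g i j ≠ color then PySem.Set.add s (pvCell g i j) else s) s)
        PySem.Set.empty
    overlapping.foldl (fun gi oc =>
      let cur := gi.1.getD color PySem.Set.empty
      if oc ∈ cur then gi
      else (gi.1.insert color (PySem.Set.add cur oc), gi.2.insert oc (gi.2.getD oc 0 + 1))) gi)
    (PySem.Dict.empty, ind0)

-- Kahn's loop (while queue).  One fuel unit per dequeue; each dequeued color is
-- fresh, so fuel = number of colors + 1 is never exhausted.
def pvKahn (graph : PySem.Dict Int (PySem.Set Int)) :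
    Nat → List Int → PySem.Dict Int Int → Int → Int
  | _, [], _, processed => processed
  | 0, _ :: _, _, processed => processed
  | fuel + 1, color :: rest, indeg, processed =>
    let st := (graph.getD color PySem.Set.empty).foldl
      (fun (st : PySem.Dict Int Int × List Int) nb =>
        let v := st.1.getD nb 0 - 1
        if v = 0 then (st.1.insert nb v, st.2 ++ [nb]) else (st.1.insert nb v, st.2)) (indeg, rest)
    pvKahn graph fuel st.2 st.1 (processed + 1)

def isPrintable_topological_sort (targetGrid : List (List Int)) : Bool :=
  if targetGrid = [] ∨ targetGrid.headD [] = [] then true else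
  let m : Int := (targetGrid.length : Int)
  let n : Int := ((targetGrid.headD []).length : Int)
  let color_bounds := pvBoundsA targetGrid m n
  let colors : PySem.Set Int := PySem.Set.ofList color_bounds.keys
  let in_degree0 : PySem.Dict Int Int :=
    colors.foldl (fun d c => d.insert c 0) PySem.Dict.empty
  let gi := pvGraphA targetGrid color_bounds in_degree0
  let queue0 : List Int := colors.foldl (fun q c => if gi.2.getD c 0 = 0 then q ++ [c] else q) []
  let processed := pvKahn gi.1 (colors.length + 1) queue0 gi.2 0
  decide (processed = (colors.length : Int))

-- ===== PORT B =====
-- first pass of B: same bounding boxes, built with get-with-default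
def pvBoundsB (g : List (List Int)) (m n : Int) : PySem.Dict Int (Int × Int × Int × Int) :=
  (PySem.List.pyRange 0 m 1).foldl (fun bx i =>
    (PySem.List.pyRange 0 n 1).foldl (fun bx j =>
      let c := pvCell g i j
      let tb := bx.getD c (i, i, j, j)
      bx.insert c (min tb.1 i, max tb.2.1 i, min tb.2.2.1 j, max tb.2.2.2 j)) bx)
    PySem.Dict.empty

-- any(targetGrid[i][j] == v for i in range(t, b+1) for j in range(l, r+1))
def pvOccurs (g : List (List Int)) (t b l r v : Int) : Bool :=
  (PySem.List.pyRange t (b + 1) 1).any (fun i =>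
    (PySem.List.pyRange l (r + 1) 1).any (fun j => pvCell g i j == v))

-- blocked(v, done): some other not-yet-done color's box contains a v-cell
def pvBlocked (g : List (List Int)) (items : List (Int × (Int × Int × Int × Int)))
    (done : PySem.Set Int) (v : Int) : Bool :=
  items.any (fun p =>
    decide (p.1 ≠ v) && decide (p.1 ∉ done) && pvOccurs g p.2.1 p.2.2.1 p.2.2.2.1 p.2.2.2.2 v)

-- one pass of the inner for-loop: admit every currently unblocked color
def pvRound (g : List (List Int)) (items : List (Int × (Int × Int × Int × Int)))
    (keys : List Int) (done : PySem.Set Int) : PySem.Set Int × Bool :=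
  keys.foldl (fun st v =>
    if v ∉ st.1 ∧ pvBlocked g items st.1 v = false then (st.1.add v, true) else st)
    (done, false)

-- while changed; one fuel unit per round, a changed round strictly grows done
def pvSaturate (g : List (List Int)) (items : List (Int × (Int × Int × Int × Int)))
    (keys : List Int) : Nat → PySem.Set Int → PySem.Set Int
  | 0, done => done
  | fuel + 1, done =>
    let st := pvRound g items keys done
    if st.2 then pvSaturate g items keys fuel st.1 else st.1

def isPrintable_topological_sort_alt (targetGrid : List (List Int)) : Bool :=
  if targetGrid = [] ∨ targetGrid.headD [] = [] then true else
  let m : Int := (targetGrid.length : Int)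
  let n : Int := ((targetGrid.headD []).length : Int)
  let boxes := pvBoundsB targetGrid m n
  let done := pvSaturate targetGrid boxes.items boxes.keys (boxes.keys.length + 1) PySem.Set.empty
  decide ((done.length : Int) = (boxes.keys.length : Int))

-- ===== PRECONDITION & SPEC =====
-- Pre_ excludes exactly the ragged grids on which Python A raises IndexError:
-- some row shorter than the first row (A indexes every row at all columns of row 0).
def Pre_isPrintable_topological_sort (targetGrid : List (List Int)) : Prop :=
  ∀ row ∈ targetGrid, (targetGrid.headD []).length ≤ row.length
instance (targetGrid : List (List Int)) : Decidable (Pre_isPrintable_topological_sort targetGrid) := by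
  unfold Pre_isPrintable_topological_sort; infer_instance

def pvWitness_isPrintable_topological_sort : List (List Int) := [[1, 2], [2, 1]]

def Spec_isPrintable_topological_sort (targetGrid : List (List Int)) (out : Bool) : Prop := out = isPrintable_topological_sort_alt targetGrid
instance (targetGrid : List (List Int)) (out : Bool) : Decidable (Spec_isPrintable_topological_sort targetGrid out) := by unfold Spec_isPrintable_topological_sort; infer_instance

-- ===== CLAIM (what is proved, stated in full; the proofs are below) =====
def Claim_equal_isPrintable_topological_sort : Prop := ∀ (targetGrid : List (List Int)), Dom_isPrintable_topological_sort targetGrid → Pre_isPrintable_topological_sort targetGrid → Spec_isPrintable_topological_sort targetGrid (isPrintable_topological_sort targetGrid)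

-- ===== LEMMAS AND PROOFS =====

-- ---- generic small helpers ----

-- set(xs) of a duplicate-free list is the list itself
lemma pvSet_ofList_eq_self (xs : List Int) (h : xs.Nodup) : PySem.Set.ofList xs = xs := by
  have main : ∀ (ys : List Int) (s : PySem.Set Int), (∀ x ∈ ys, x ∉ s) → ys.Nodup →
      List.foldl PySem.Set.add s ys = s ++ ys := by
    intro ys
    induction ys with
    | nil => simp
    | cons a l ih =>
      intro s hdis hnd
      have ha : a ∉ s := hdis a (by simp)
      simp only [List.foldl_cons]
      rw [PySem.Set.add_of_not_mem ha, ih _ ?_ (List.nodup_cons.mp hnd).2]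
      · simp
      · intro x hx
        simp only [List.mem_append, List.mem_singleton]
        rintro (h1 | rfl)
        · exact hdis x (by simp [hx]) h1
        · exact (List.nodup_cons.mp hnd).1 hx
  simpa [PySem.Set.ofList, PySem.Set.empty] using main xs [] (by simp) h

-- a nested fold over two index ranges is a fold over the list of index pairs
lemma pvFoldl_nest {α : Type} (f : α → Int → Int → α) (outer inner : List Int) :
    ∀ (init : α),
      outer.foldl (fun a i => inner.foldl (fun a j => f a i j) a) init
        = (outer.flatMap (fun i => inner.map (fun j => (i, j)))).foldl (fun a p => f a p.1 p.2) init := by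
  induction outer with
  | nil => simp
  | cons i l ih => intro init; simp [List.foldl_append, List.foldl_map, ih]

-- the grid's cell coordinates, row major
def pvCells (m n : Int) : List (Int × Int) :=
  (PySem.List.pyRange 0 m 1).flatMap (fun i => (PySem.List.pyRange 0 n 1).map (fun j => (i, j)))

lemma pvMem_cells (m n : Int) (p : Int × Int) :
    p ∈ pvCells m n ↔ (0 ≤ p.1 ∧ p.1 < m ∧ 0 ≤ p.2 ∧ p.2 < n) := by
  obtain ⟨i, j⟩ := p
  simp [pvCells, PySem.List.mem_pyRange_one]
  aesop

-- ---- the bounding-box dicts ----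

def pvBoxVal (g : List (List Int)) (cb : PySem.Dict Int (Int × Int × Int × Int))
    (p : Int × Int) : Int × Int × Int × Int :=
  match cb.get? (pvCell g p.1 p.2) with
  | none => (p.1, p.1, p.2, p.2)
  | some (t, b, l, r) => (min t p.1, max b p.1, min l p.2, max r p.2)

def pvBoxStep (g : List (List Int)) : PySem.Dict Int (Int × Int × Int × Int) → Int × Int →
    PySem.Dict Int (Int × Int × Int × Int) :=
  fun cb p => cb.insert (pvCell g p.1 p.2) (pvBoxVal g cb p)

lemma pvBoundsA_as_cells (g : List (List Int)) (m n : Int) :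
    pvBoundsA g m n = (pvCells m n).foldl (pvBoxStep g) PySem.Dict.empty := by
  unfold pvBoundsA pvCells pvBoxStep
  exact pvFoldl_nest _ _ _ _

lemma pvBounds_eq (g : List (List Int)) (m n : Int) : pvBoundsB g m n = pvBoundsA g m n := by
  unfold pvBoundsA pvBoundsB
  apply List.foldl_ext
  intro cb i _
  apply List.foldl_ext
  intro cb j _
  cases h : cb.get? (pvCell g i j) with
  | none => simp [PySem.Dict.getD_eq_get?_getD, h]
  | some tb => obtain ⟨t, b, l, r⟩ := tb; simp [PySem.Dict.getD_eq_get?_getD, h]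

lemma pvBoundsA_keys_nodup (g : List (List Int)) (m n : Int) : (pvBoundsA g m n).keys.Nodup := by
  rw [pvBoundsA_as_cells]
  unfold pvBoxStep
  exact PySem.Dict.nodup_keys_foldl_insert_key (pvCells m n) (fun p => pvCell g p.1 p.2)
    (pvBoxVal g) PySem.Dict.empty PySem.Dict.nodup_keys_empty

lemma pvMem_keys_boundsA (g : List (List Int)) (m n : Int) (c : Int) :
    c ∈ (pvBoundsA g m n).keys ↔ ∃ p ∈ pvCells m n, pvCell g p.1 p.2 = c := by
  rw [pvBoundsA_as_cells]
  unfold pvBoxStep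
  rw [PySem.Dict.keys_foldl_insert_key (pvCells m n) (fun p => pvCell g p.1 p.2) (pvBoxVal g)]
  have h1 : (PySem.Dict.empty : PySem.Dict Int (Int × Int × Int × Int)).keys = ([] : List Int) := rfl
  rw [h1]
  have hupd : PySem.Set.update ([] : List Int) ((pvCells m n).map (fun p => pvCell g p.1 p.2))
      = PySem.Set.ofList ((pvCells m n).map (fun p => pvCell g p.1 p.2)) := rfl
  rw [hupd, PySem.Set.mem_ofList]
  simp

lemma pvBoundsA_box_spec (g : List (List Int)) (m n : Int) :
    ∀ c v, (pvBoundsA g m n).get? c = some v →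
      0 ≤ v.1 ∧ v.1 ≤ v.2.1 ∧ v.2.1 < m ∧ 0 ≤ v.2.2.1 ∧ v.2.2.1 ≤ v.2.2.2 ∧ v.2.2.2 < n := by
  rw [pvBoundsA_as_cells]
  have main : ∀ (l : List (Int × Int)) (d : PySem.Dict Int (Int × Int × Int × Int)),
      (∀ p ∈ l, 0 ≤ p.1 ∧ p.1 < m ∧ 0 ≤ p.2 ∧ p.2 < n) →
      (∀ c v, d.get? c = some v →
        0 ≤ v.1 ∧ v.1 ≤ v.2.1 ∧ v.2.1 < m ∧ 0 ≤ v.2.2.1 ∧ v.2.2.1 ≤ v.2.2.2 ∧ v.2.2.2 < n) →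
      ∀ c v, (l.foldl (pvBoxStep g) d).get? c = some v →
        0 ≤ v.1 ∧ v.1 ≤ v.2.1 ∧ v.2.1 < m ∧ 0 ≤ v.2.2.1 ∧ v.2.2.1 ≤ v.2.2.2 ∧ v.2.2.2 < n := by
    intro l
    induction l with
    | nil => intro d _ hd; simpa using hd
    | cons p rest ih =>
      intro d hl hd
      simp only [List.foldl_cons]
      apply ih _ (fun q hq => hl q (by simp [hq]))
      intro c v hv
      have hp := hl p (by simp)
      unfold pvBoxStep at hv
      rw [PySem.Dict.get?_insert] at hv
      split_ifs at hv with hc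
      · cases hget : d.get? (pvCell g p.1 p.2) with
        | none =>
          unfold pvBoxVal at hv; rw [hget] at hv; simp at hv; subst hv; simp; omega
        | some tb =>
          obtain ⟨t, b, l', r⟩ := tb
          have hb := hd _ _ hget
          unfold pvBoxVal at hv; rw [hget] at hv; simp at hv; subst hv
          simp at hb ⊢
          omega
      · exact hd _ _ hv
  intro c v hv
  refine main _ _ (fun p hp => ?_) (by simp [PySem.Dict.get?_empty]) c v hv
  exact (pvMem_cells m n p).mp hp

-- ---- the dependency relation between colors ----

-- c must be printed before v: v ≠ c and a v-cell lies in c's bounding box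
def pvEdge (g : List (List Int)) (CB : PySem.Dict Int (Int × Int × Int × Int)) (c v : Int) : Bool :=
  match CB.get? c with
  | some tb => decide (v ≠ c) && pvOccurs g tb.1 tb.2.1 tb.2.2.1 tb.2.2.2 v
  | none => false

def pvPredsDone (g : List (List Int)) (CB : PySem.Dict Int (Int × Int × Int × Int))
    (S : List Int) (v : Int) : Prop := ∀ c, pvEdge g CB c v = true → c ∈ S

def pvClosed (g : List (List Int)) (CB : PySem.Dict Int (Int × Int × Int × Int))
    (keys S : List Int) : Prop := ∀ v ∈ keys, pvPredsDone g CB S v → v ∈ S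

lemma pvEdge_ne {g : List (List Int)} {CB : PySem.Dict Int (Int × Int × Int × Int)} {c v : Int}
    (h : pvEdge g CB c v = true) : v ≠ c := by
  unfold pvEdge at h
  cases hc : CB.get? c with
  | none => rw [hc] at h; simp at h
  | some tb => rw [hc] at h; simp at h; exact h.1

lemma pvEdge_mem_keys {g : List (List Int)} {CB : PySem.Dict Int (Int × Int × Int × Int)} {c v : Int}
    (h : pvEdge g CB c v = true) : c ∈ CB.keys := by
  unfold pvEdge at h
  cases hc : CB.get? c with
  | none => rw [hc] at h; simp at h
  | some tb =>
    by_contra hmem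
    rw [(PySem.Dict.get?_eq_none_iff_not_mem_keys CB c).mpr hmem] at hc
    cases hc

lemma pvGet?_of_mem_keys (CB : PySem.Dict Int (Int × Int × Int × Int)) (c : Int)
    (h : c ∈ CB.keys) : CB.get? c = some (CB.getD c (0, 0, 0, 0)) := by
  cases hc : CB.get? c with
  | none => exact absurd ((PySem.Dict.get?_eq_none_iff_not_mem_keys CB c).mp hc h).elim id
  | some tb => rw [PySem.Dict.getD_eq_get?_getD, hc]; rfl

-- cells of a bounding box, row major
def pvBoxCells (t b l r : Int) : List (Int × Int) :=
  (PySem.List.pyRange t (b + 1) 1).flatMap (fun i =>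
    (PySem.List.pyRange l (r + 1) 1).map (fun j => (i, j)))

lemma pvOccurs_iff (g : List (List Int)) (t b l r v : Int) :
    pvOccurs g t b l r v = true ↔ ∃ p ∈ pvBoxCells t b l r, pvCell g p.1 p.2 = v := by
  simp [pvOccurs, pvBoxCells, List.any_eq_true]

-- a v-cell of a box is a real grid cell, so v is a color (a key of the bounds dict)
lemma pvEdge_target_mem_keys (g : List (List Int)) (m n : Int) {c v : Int}
    (h : pvEdge g (pvBoundsA g m n) c v = true) : v ∈ (pvBoundsA g m n).keys := by
  unfold pvEdge at h
  cases hc : (pvBoundsA g m n).get? c with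
  | none => rw [hc] at h; simp at h
  | some tb =>
    rw [hc] at h
    simp only [Bool.and_eq_true, decide_eq_true_eq] at h
    obtain ⟨p, hp, hcell⟩ := (pvOccurs_iff g _ _ _ _ v).mp h.2
    have hbox := pvBoundsA_box_spec g m n c tb hc
    simp only [pvBoxCells, List.mem_flatMap, List.mem_map] at hp
    obtain ⟨i, hi, j, hj, hpij⟩ := hp
    rw [PySem.List.mem_pyRange_one] at hi hj
    refine (pvMem_keys_boundsA g m n v).mpr ⟨p, ?_, hcell⟩
    rw [pvMem_cells]
    subst hpij
    simp at *
    omega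

-- blocked(v, done) is false exactly when every predecessor of v is already done
lemma pvBlocked_false_iff (g : List (List Int)) (CB : PySem.Dict Int (Int × Int × Int × Int))
    (hnd : CB.keys.Nodup) (done : PySem.Set Int) (v : Int) :
    pvBlocked g CB.items done v = false ↔ pvPredsDone g CB done v := by
  unfold pvBlocked pvPredsDone
  rw [PySem.Dict.items_eq_map_keys CB hnd (0, 0, 0, 0), List.any_map, List.any_eq_false]
  constructor
  · intro h c hc
    have hck := pvEdge_mem_keys hc
    have hget := pvGet?_of_mem_keys CB c hck
    unfold pvEdge at hc
    rw [hget] at hc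
    simp only [Bool.and_eq_true, decide_eq_true_eq] at hc
    have := h c hck
    simp only [Function.comp] at this
    by_contra hdone
    apply this
    simp [Ne.symm hc.1, hdone, hc.2]
  · intro h c hck
    simp only [Function.comp]
    intro hbad
    simp only [Bool.and_eq_true, decide_eq_true_eq] at hbad
    have hget := pvGet?_of_mem_keys CB c hck
    have hedge : pvEdge g CB c v = true := by
      unfold pvEdge
      rw [hget]
      simp [Ne.symm hbad.1.1, hbad.2]
    exact hbad.1.2 (h c hedge)

-- ---- A's in-degree seed and initial queue ----

lemma pvInd0_getD (colors : List Int) (w : Int) :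
    (colors.foldl (fun d c => d.insert c (0 : Int)) PySem.Dict.empty).getD w 0 = 0 := by
  have main : ∀ (l : List Int) (d : PySem.Dict Int Int), d.getD w 0 = 0 →
      (l.foldl (fun d c => d.insert c (0 : Int)) d).getD w 0 = 0 := by
    intro l
    induction l with
    | nil => intro d h; simpa using h
    | cons c rest ih =>
      intro d h
      simp only [List.foldl_cons]
      apply ih
      rw [PySem.Dict.getD_insert]
      split_ifs <;> simp [h]
  exact main colors _ (by simp [PySem.Dict.getD_empty])

lemma pvQueue0_eq (colors : List Int) (ind : PySem.Dict Int Int) :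
    colors.foldl (fun q c => if ind.getD c 0 = 0 then q ++ [c] else q) []
      = colors.filter (fun c => decide (ind.getD c 0 = 0)) := by
  have main : ∀ (l : List Int) (acc : List Int),
      l.foldl (fun q c => if ind.getD c 0 = 0 then q ++ [c] else q) acc
        = acc ++ l.filter (fun c => decide (ind.getD c 0 = 0)) := by
    intro l
    induction l with
    | nil => simp
    | cons c rest ih =>
      intro acc
      simp only [List.foldl_cons, List.filter_cons]
      by_cases h : ind.getD c 0 = 0
      · simp [h, ih]
      · simp [h, ih]
  simpa using main colors []

-- ---- A's graph construction ----

-- the overlapping-colors set of one color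
lemma pvOverlap_spec (g : List (List Int)) (color t b l r : Int) :
    let O := (PySem.List.pyRange t (b + 1) 1).foldl (fun s i =>
      (PySem.List.pyRange l (r + 1) 1).foldl (fun s j =>
        if pvCell g i j ≠ color then PySem.Set.add s (pvCell g i j) else s) s) PySem.Set.empty
    O.Nodup ∧ ∀ w, w ∈ O ↔ (w ≠ color ∧ pvOccurs g t b l r w = true) := by
  intro O
  have hO : O = (pvBoxCells t b l r).foldl
      (fun s p => if pvCell g p.1 p.2 ≠ color then PySem.Set.add s (pvCell g p.1 p.2) else s)
      PySem.Set.empty := by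
    unfold pvBoxCells
    exact pvFoldl_nest (fun s i j => if pvCell g i j ≠ color then PySem.Set.add s (pvCell g i j) else s) _ _ _
  have main : ∀ (L : List (Int × Int)) (s : PySem.Set Int), s.Nodup →
      (L.foldl (fun s p => if pvCell g p.1 p.2 ≠ color then PySem.Set.add s (pvCell g p.1 p.2) else s) s).Nodup
      ∧ ∀ w, w ∈ L.foldl (fun s p => if pvCell g p.1 p.2 ≠ color then PySem.Set.add s (pvCell g p.1 p.2) else s) s
          ↔ (w ∈ s ∨ ∃ p ∈ L, pvCell g p.1 p.2 = w ∧ w ≠ color) := by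
    intro L
    induction L with
    | nil => intro s hs; simpa using hs
    | cons p rest ih =>
      intro s hs
      simp only [List.foldl_cons]
      by_cases hp : pvCell g p.1 p.2 ≠ color
      · rw [if_pos hp]
        obtain ⟨h1, h2⟩ := ih (s.add (pvCell g p.1 p.2)) (PySem.Set.nodup_add s _ hs)
        refine ⟨h1, fun w => ?_⟩
        rw [h2 w, PySem.Set.mem_add]
        constructor
        · rintro (⟨h | rfl⟩ | ⟨q, hq, hcell, hne⟩)
          · exact Or.inl h
          · exact Or.inr ⟨p, by simp, rfl, hp⟩
          · exact Or.inr ⟨q, by simp [hq], hcell, hne⟩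
        · rintro (h | ⟨q, hq, hcell, hne⟩)
          · exact Or.inl (Or.inl h)
          · rcases List.mem_cons.mp hq with rfl | hq'
            · exact Or.inl (Or.inr hcell.symm)
            · exact Or.inr ⟨q, hq', hcell, hne⟩
      · rw [if_neg hp]
        push Not at hp
        obtain ⟨h1, h2⟩ := ih s hs
        refine ⟨h1, fun w => ?_⟩
        rw [h2 w]
        constructor
        · rintro (h | ⟨q, hq, hcell, hne⟩)
          · exact Or.inl h
          · exact Or.inr ⟨q, by simp [hq], hcell, hne⟩
        · rintro (h | ⟨q, hq, hcell, hne⟩)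
          · exact Or.inl h
          · rcases List.mem_cons.mp hq with rfl | hq'
            · exact absurd (hp ▸ hcell).symm hne
            · exact Or.inr ⟨q, hq', hcell, hne⟩
  rw [hO]
  obtain ⟨h1, h2⟩ := main (pvBoxCells t b l r) PySem.Set.empty (by simp [PySem.Set.empty])
  refine ⟨h1, fun w => ?_⟩
  rw [h2 w, pvOccurs_iff]
  simp [PySem.Set.empty]
  tauto
-- ---- A's graph/in-degree fold, characterized ----

def pvAddStep (color : Int) :
    (PySem.Dict Int (PySem.Set Int) × PySem.Dict Int Int) → Int →
    (PySem.Dict Int (PySem.Set Int) × PySem.Dict Int Int) :=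
  fun gi oc =>
    let cur := gi.1.getD color PySem.Set.empty
    if oc ∈ cur then gi
    else (gi.1.insert color (PySem.Set.add cur oc), gi.2.insert oc (gi.2.getD oc 0 + 1))

def pvColorStep (g : List (List Int)) (CB : PySem.Dict Int (Int × Int × Int × Int)) :
    (PySem.Dict Int (PySem.Set Int) × PySem.Dict Int Int) → Int →
    (PySem.Dict Int (PySem.Set Int) × PySem.Dict Int Int) :=
  fun gi k =>
    let tb := CB.getD k (0, 0, 0, 0)
    let O : PySem.Set Int := (PySem.List.pyRange tb.1 (tb.2.1 + 1) 1).foldl (fun s i =>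
      (PySem.List.pyRange tb.2.2.1 (tb.2.2.2 + 1) 1).foldl (fun s j =>
        if pvCell g i j ≠ k then PySem.Set.add s (pvCell g i j) else s) s) PySem.Set.empty
    O.foldl (pvAddStep k) gi

lemma pvGraphA_as_keys (g : List (List Int)) (CB : PySem.Dict Int (Int × Int × Int × Int))
    (ind0 : PySem.Dict Int Int) (hnd : CB.keys.Nodup) :
    pvGraphA g CB ind0 = CB.keys.foldl (pvColorStep g CB) (PySem.Dict.empty, ind0) := by
  unfold pvGraphA pvColorStep pvAddStep
  rw [PySem.Dict.items_eq_map_keys CB hnd (0, 0, 0, 0), List.foldl_map]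

lemma pvAddStep_spec (color : Int) :
    ∀ (O : List Int), O.Nodup →
    ∀ (gph : PySem.Dict Int (PySem.Set Int)) (ind : PySem.Dict Int Int),
      (gph.getD color PySem.Set.empty).Nodup →
      (∀ w ∈ O, w ∉ gph.getD color PySem.Set.empty) →
      (∀ w, w ∈ (O.foldl (pvAddStep color) (gph, ind)).1.getD color PySem.Set.empty ↔
          (w ∈ gph.getD color PySem.Set.empty ∨ w ∈ O))
      ∧ ((O.foldl (pvAddStep color) (gph, ind)).1.getD color PySem.Set.empty).Nodup
      ∧ (∀ c, c ≠ color → (O.foldl (pvAddStep color) (gph, ind)).1.get? c = gph.get? c)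
      ∧ (∀ w, (O.foldl (pvAddStep color) (gph, ind)).2.getD w 0
          = ind.getD w 0 + (if w ∈ O then 1 else 0)) := by
  intro O
  induction O with
  | nil => intro _ gph ind h1 _; exact ⟨by simp, h1, fun _ _ => rfl, by simp⟩
  | cons oc rest ih =>
    intro hO gph ind hcur hdis
    have hocrest : oc ∉ rest := (List.nodup_cons.mp hO).1
    have hoc : oc ∉ gph.getD color PySem.Set.empty := hdis oc (by simp)
    have hstep : pvAddStep color (gph, ind) oc
        = (gph.insert color ((gph.getD color PySem.Set.empty).add oc),
           ind.insert oc (ind.getD oc 0 + 1)) := by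
      unfold pvAddStep
      simp only [if_neg hoc]
    simp only [List.foldl_cons, hstep]
    have hgetD : (gph.insert color ((gph.getD color PySem.Set.empty).add oc)).getD color
        PySem.Set.empty = (gph.getD color PySem.Set.empty).add oc :=
      PySem.Dict.getD_insert_self _ _ _ _
    obtain ⟨m1, m2, m3, m4⟩ := ih (List.nodup_cons.mp hO).2
      (gph.insert color ((gph.getD color PySem.Set.empty).add oc))
      (ind.insert oc (ind.getD oc 0 + 1))
      (by rw [hgetD]; exact PySem.Set.nodup_add _ _ hcur)
      (by
        intro w hw
        rw [hgetD, PySem.Set.mem_add]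
        rintro (h | rfl)
        · exact hdis w (by simp [hw]) h
        · exact hocrest hw)
    refine ⟨fun w => ?_, m2, fun c hc => ?_, fun w => ?_⟩
    · rw [m1 w, hgetD, PySem.Set.mem_add]
      simp only [List.mem_cons]
      tauto
    · rw [m3 c hc, PySem.Dict.get?_insert_of_ne _ _ hc]
    · rw [m4 w, PySem.Dict.getD_insert]
      by_cases hw : w = oc
      · subst hw
        simp [hocrest]
      · simp only [List.mem_cons, hw, false_or]
        rfl

lemma pvColorStep_spec (g : List (List Int)) (CB : PySem.Dict Int (Int × Int × Int × Int)) :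
    ∀ (K : List Int), K.Nodup → (∀ c ∈ K, c ∈ CB.keys) →
    ∀ (gph : PySem.Dict Int (PySem.Set Int)) (ind : PySem.Dict Int Int),
      (∀ c ∈ K, gph.contains c = false) →
      (∀ c, c ∉ K → ∀ w, (w ∈ gph.getD c PySem.Set.empty ↔ pvEdge g CB c w = true)) →
      (∀ c, (gph.getD c PySem.Set.empty).Nodup) →
      (∀ c w, w ∈ (K.foldl (pvColorStep g CB) (gph, ind)).1.getD c PySem.Set.empty ↔
          pvEdge g CB c w = true)
      ∧ (∀ c, ((K.foldl (pvColorStep g CB) (gph, ind)).1.getD c PySem.Set.empty).Nodup)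
      ∧ (∀ w, (K.foldl (pvColorStep g CB) (gph, ind)).2.getD w 0
          = ind.getD w 0 + ((K.filter (fun c => pvEdge g CB c w)).length : Int)) := by
  intro K
  induction K with
  | nil =>
    intro _ _ gph ind _ hprev hnodup
    exact ⟨fun c w => by simpa using hprev c (by simp) w, fun c => by simpa using hnodup c,
      fun w => by simp⟩
  | cons k K' ih =>
    intro hK hKsub gph ind hcont hprev hnodup
    have hkK' : k ∉ K' := (List.nodup_cons.mp hK).1
    have hkkeys : k ∈ CB.keys := hKsub k (by simp)
    have hget : CB.get? k = some (CB.getD k (0, 0, 0, 0)) := pvGet?_of_mem_keys CB k hkkeys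
    obtain ⟨hOnodup, hOmem⟩ := pvOverlap_spec g k (CB.getD k (0, 0, 0, 0)).1
      (CB.getD k (0, 0, 0, 0)).2.1 (CB.getD k (0, 0, 0, 0)).2.2.1 (CB.getD k (0, 0, 0, 0)).2.2.2
    have hedgek : ∀ w, (w ∈ (PySem.List.pyRange (CB.getD k (0, 0, 0, 0)).1
        ((CB.getD k (0, 0, 0, 0)).2.1 + 1) 1).foldl (fun s i =>
        (PySem.List.pyRange (CB.getD k (0, 0, 0, 0)).2.2.1
          ((CB.getD k (0, 0, 0, 0)).2.2.2 + 1) 1).foldl (fun s j =>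
          if pvCell g i j ≠ k then PySem.Set.add s (pvCell g i j) else s) s) PySem.Set.empty)
        ↔ pvEdge g CB k w = true := by
      intro w
      rw [hOmem w]
      unfold pvEdge
      rw [hget]
      simp
    have hcurk : gph.getD k PySem.Set.empty = PySem.Set.empty :=
      PySem.Dict.getD_of_not_contains _ _ (hcont k (by simp))
    simp only [List.foldl_cons]
    have hstep : pvColorStep g CB (gph, ind) k = ((PySem.List.pyRange (CB.getD k (0, 0, 0, 0)).1
        ((CB.getD k (0, 0, 0, 0)).2.1 + 1) 1).foldl (fun s i =>
        (PySem.List.pyRange (CB.getD k (0, 0, 0, 0)).2.2.1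
          ((CB.getD k (0, 0, 0, 0)).2.2.2 + 1) 1).foldl (fun s j =>
          if pvCell g i j ≠ k then PySem.Set.add s (pvCell g i j) else s) s)
        PySem.Set.empty).foldl (pvAddStep k) (gph, ind) := rfl
    obtain ⟨m1, m2, m3, m4⟩ := pvAddStep_spec k _ hOnodup gph ind
      (by rw [hcurk]; simp [PySem.Set.empty])
      (by intro w _; rw [hcurk]; simp [PySem.Set.empty])
    rw [hstep]
    set gi1 := ((PySem.List.pyRange (CB.getD k (0, 0, 0, 0)).1
        ((CB.getD k (0, 0, 0, 0)).2.1 + 1) 1).foldl (fun s i =>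
        (PySem.List.pyRange (CB.getD k (0, 0, 0, 0)).2.2.1
          ((CB.getD k (0, 0, 0, 0)).2.2.2 + 1) 1).foldl (fun s j =>
          if pvCell g i j ≠ k then PySem.Set.add s (pvCell g i j) else s) s)
        PySem.Set.empty).foldl (pvAddStep k) (gph, ind) with hgi1
    have hgetD_ne : ∀ c, c ≠ k → gi1.1.getD c PySem.Set.empty = gph.getD c PySem.Set.empty := by
      intro c hc
      rw [PySem.Dict.getD_eq_get?_getD, PySem.Dict.getD_eq_get?_getD, m3 c hc]
    obtain ⟨r1, r2, r3⟩ := ih (List.nodup_cons.mp hK).2 (fun c hc => hKsub c (by simp [hc]))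
      gi1.1 gi1.2
      (by
        intro c hc
        have hck : c ≠ k := fun h => hkK' (h ▸ hc)
        rw [PySem.Dict.contains_eq_isSome_get?, m3 c hck, ← PySem.Dict.contains_eq_isSome_get?]
        exact hcont c (by simp [hc]))
      (by
        intro c hc w
        by_cases hck : c = k
        · subst hck
          rw [m1 w, hcurk]
          simp only [PySem.Set.empty] at *
          rw [← hedgek w]
          simp
        · rw [hgetD_ne c hck]
          exact hprev c (by simp [hck, hc]) w)
      (by
        intro c
        by_cases hck : c = k
        · subst hck; exact m2
        · rw [hgetD_ne c hck]; exact hnodup c)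
    refine ⟨r1, r2, fun w => ?_⟩
    rw [r3 w, m4 w]
    have hite : (if w ∈ (PySem.List.pyRange (CB.getD k (0, 0, 0, 0)).1
        ((CB.getD k (0, 0, 0, 0)).2.1 + 1) 1).foldl (fun s i =>
        (PySem.List.pyRange (CB.getD k (0, 0, 0, 0)).2.2.1
          ((CB.getD k (0, 0, 0, 0)).2.2.2 + 1) 1).foldl (fun s j =>
          if pvCell g i j ≠ k then PySem.Set.add s (pvCell g i j) else s) s) PySem.Set.empty
        then (1 : Int) else 0) = (if pvEdge g CB k w = true then (1 : Int) else 0) := by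
      by_cases h : pvEdge g CB k w = true
      · rw [if_pos ((hedgek w).mpr h), if_pos h]
      · rw [if_neg (fun hh => h ((hedgek w).mp hh)), if_neg h]
    rw [hite]
    simp only [List.filter_cons]
    by_cases h : pvEdge g CB k w = true
    · simp only [h, if_pos, List.length_cons]
      push_cast
      ring
    · simp only [h]
      simp only [Bool.false_eq_true, if_false]
      ring

lemma pvGraphA_spec (g : List (List Int)) (CB : PySem.Dict Int (Int × Int × Int × Int))
    (ind0 : PySem.Dict Int Int) (hnd : CB.keys.Nodup) (h0 : ∀ w, ind0.getD w 0 = 0) :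
    (∀ c w, w ∈ (pvGraphA g CB ind0).1.getD c PySem.Set.empty ↔ pvEdge g CB c w = true)
    ∧ (∀ c, ((pvGraphA g CB ind0).1.getD c PySem.Set.empty).Nodup)
    ∧ (∀ w, (pvGraphA g CB ind0).2.getD w 0
        = ((CB.keys.filter (fun c => pvEdge g CB c w)).length : Int)) := by
  rw [pvGraphA_as_keys g CB ind0 hnd]
  obtain ⟨r1, r2, r3⟩ := pvColorStep_spec g CB CB.keys hnd (fun c hc => hc)
    PySem.Dict.empty ind0
    (by intro c _; simp [PySem.Dict.contains_empty])
    (by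
      intro c hc w
      have : pvEdge g CB c w = false := by
        unfold pvEdge
        rw [(PySem.Dict.get?_eq_none_iff_not_mem_keys CB c).mpr hc]
      simp [PySem.Dict.getD_empty, this, PySem.Set.empty])
    (by intro c; simp [PySem.Dict.getD_empty, PySem.Set.empty])
  exact ⟨r1, r2, fun w => by rw [r3 w, h0 w]; ring⟩

-- ---- Kahn's loop, characterized ----

def pvDecStep : (PySem.Dict Int Int × List Int) → Int → (PySem.Dict Int Int × List Int) :=
  fun st nb =>
    let v := st.1.getD nb 0 - 1
    if v = 0 then (st.1.insert nb v, st.2 ++ [nb]) else (st.1.insert nb v, st.2)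

lemma pvDec_spec : ∀ (N : List Int), N.Nodup →
    ∀ (indeg : PySem.Dict Int Int) (q : List Int) (base : Int → Int),
    (∀ w, indeg.getD w 0 = base w) →
    (∀ w, (N.foldl pvDecStep (indeg, q)).1.getD w 0 = base w - (if w ∈ N then 1 else 0))
    ∧ (N.foldl pvDecStep (indeg, q)).2 = q ++ N.filter (fun w => decide (base w - 1 = 0)) := by
  intro N
  induction N with
  | nil => intro _ indeg q base hb; refine ⟨fun w => by simp [hb w], by simp⟩
  | cons nb rest ih =>
    intro hN indeg q base hb
    have hnbrest : nb ∉ rest := (List.nodup_cons.mp hN).1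
    have hstep : pvDecStep (indeg, q) nb
        = (indeg.insert nb (base nb - 1),
            if base nb - 1 = 0 then q ++ [nb] else q) := by
      simp only [pvDecStep, hb nb]
      split_ifs <;> rfl
    simp only [List.foldl_cons, hstep]
    obtain ⟨m1, m2⟩ := ih (List.nodup_cons.mp hN).2 (indeg.insert nb (base nb - 1))
      (if base nb - 1 = 0 then q ++ [nb] else q)
      (fun w => base w - (if w = nb then 1 else 0))
      (by
        intro w
        simp only [PySem.Dict.getD_insert]
        by_cases h1 : w = nb
        · subst h1
          simp
        · simp [h1, hb w])
    constructor
    · intro w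
      rw [m1 w]
      by_cases h1 : w = nb
      · subst h1
        rw [if_pos rfl, if_neg hnbrest, if_pos (show w ∈ w :: rest by simp)]
        ring
      · rw [if_neg h1]
        by_cases h2 : w ∈ rest
        · rw [if_pos h2, if_pos (List.mem_cons_of_mem _ h2)]
          ring
        · rw [if_neg h2, if_neg (by simp [h1, h2])]
          ring
    · rw [m2]
      have hfc : rest.filter (fun w => decide (base w - (if w = nb then 1 else 0) - 1 = 0))
          = rest.filter (fun w => decide (base w - 1 = 0)) := by
        apply List.filter_congr
        intro w hw
        have : w ≠ nb := fun h => hnbrest (h ▸ hw)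
        simp [this]
      rw [hfc, List.filter_cons]
      by_cases h : base nb - 1 = 0
      · simp [h]
      · simp [h]

-- the loop invariant of Kahn's algorithm: D is the processed set, Q the pending queue
def pvInv (g : List (List Int)) (CB : PySem.Dict Int (Int × Int × Int × Int))
    (keys D Q : List Int) (indeg : PySem.Dict Int Int) : Prop :=
  D.Nodup ∧ (∀ x ∈ D, x ∈ keys) ∧ Q.Nodup ∧ (∀ q ∈ Q, q ∈ keys ∧ q ∉ D)
  ∧ (∀ v ∈ D, pvPredsDone g CB D v)
  ∧ (∀ v ∈ keys, (v ∈ Q ↔ (v ∉ D ∧ pvPredsDone g CB D v)))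
  ∧ (∀ w, indeg.getD w 0
      = ((keys.filter (fun c => pvEdge g CB c w && decide (c ∉ D))).length : Int))

-- removing a processed predecessor u from the not-yet-processed count
lemma pvFilter_sub (q : Int → Bool) (D : List Int) (u : Int) (huD : u ∉ D) :
    ∀ (l : List Int), l.Nodup → u ∈ l →
    ((l.filter (fun c => q c && decide (c ∉ D ++ [u]))).length : Int)
      = ((l.filter (fun c => q c && decide (c ∉ D))).length : Int)
        - (if q u = true then 1 else 0) := by
  intro l
  induction l with
  | nil => simp
  | cons a l' ih =>
    intro hl hu
    have hal' : a ∉ l' := (List.nodup_cons.mp hl).1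
    rcases List.mem_cons.mp hu with rfl | hu'
    · have hfc : l'.filter (fun c => q c && decide (c ∉ D ++ [u]))
          = l'.filter (fun c => q c && decide (c ∉ D)) := by
        apply List.filter_congr
        intro c hc
        have hcu : c ≠ u := fun h => hal' (h ▸ hc)
        simp [hcu]
      rw [List.filter_cons, List.filter_cons, hfc]
      by_cases hq : q u = true
      · simp [hq, huD]
      · simp only [Bool.not_eq_true] at hq
        simp [hq]
    · have hau : a ≠ u := fun h => hal' (h ▸ hu')
      rw [List.filter_cons, List.filter_cons]
      have hsame : (q a && decide (a ∉ D ++ [u])) = (q a && decide (a ∉ D)) := by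
        simp [hau]
      rw [hsame]
      have := ih (List.nodup_cons.mp hl).2 hu'
      by_cases hqa : (q a && decide (a ∉ D)) = true
      · simp only [hqa, if_pos, List.length_cons]
        push_cast
        omega
      · simp only [hqa]
        simp only [Bool.false_eq_true, if_false]
        exact this

lemma pvKahn_spec (g : List (List Int)) (CB : PySem.Dict Int (Int × Int × Int × Int))
    (keys : List Int) (graph : PySem.Dict Int (PySem.Set Int))
    (hknd : keys.Nodup)
    (HG : ∀ c w, w ∈ graph.getD c PySem.Set.empty ↔ pvEdge g CB c w = true)
    (HGnd : ∀ c, (graph.getD c PySem.Set.empty).Nodup)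
    (HK : ∀ c w, pvEdge g CB c w = true → c ∈ keys)
    (HT : ∀ c w, pvEdge g CB c w = true → w ∈ keys) :
    ∀ (fuel : Nat) (Q : List Int) (indeg : PySem.Dict Int Int) (D : List Int),
    pvInv g CB keys D Q indeg → keys.length - D.length < fuel →
    ∃ Dfin : List Int,
      pvKahn graph fuel Q indeg (D.length : Int) = (Dfin.length : Int)
      ∧ Dfin.Nodup ∧ (∀ x ∈ Dfin, x ∈ keys) ∧ pvClosed g CB keys Dfin
      ∧ (∀ S : List Int, pvClosed g CB keys S → (∀ x ∈ D, x ∈ S) → (∀ q ∈ Q, q ∈ S) →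
          ∀ x ∈ Dfin, x ∈ S) := by
  intro fuel
  induction fuel with
  | zero => intro Q indeg D _ hfuel; omega
  | succ fuel ih =>
    intro Q indeg D hinv hfuel
    obtain ⟨inv1, inv2, inv3, inv4, inv5, inv6, inv7⟩ := hinv
    cases Q with
    | nil =>
      refine ⟨D, rfl, inv1, inv2, ?_, fun S _ hD _ x hx => hD x hx⟩
      intro v hv hpd
      by_contra hvD
      exact List.not_mem_nil ((inv6 v hv).mpr ⟨hvD, hpd⟩)
    | cons u rest =>
      have hu := inv4 u (by simp)
      have hpdu : pvPredsDone g CB D u := ((inv6 u hu.1).mp (by simp)).2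
      have hurest : u ∉ rest := (List.nodup_cons.mp inv3).1
      -- the neighbor set of u
      have hNedge : ∀ w, w ∈ graph.getD u PySem.Set.empty → pvEdge g CB u w = true :=
        fun w hw => (HG u w).mp hw
      have F0 : ∀ w ∈ graph.getD u PySem.Set.empty, w ≠ u :=
        fun w hw => pvEdge_ne (hNedge w hw)
      have F1 : ∀ w ∈ graph.getD u PySem.Set.empty, w ∉ D := by
        intro w hw hwD
        exact hu.2 (inv5 w hwD u (hNedge w hw))
      have F2 : ∀ w ∈ graph.getD u PySem.Set.empty, w ∉ u :: rest := by
        intro w hw hwQ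
        have hwk := (inv4 w hwQ).1
        exact hu.2 (((inv6 w hwk).mp hwQ).2 u (hNedge w hw))
      have F3 : ∀ w ∈ graph.getD u PySem.Set.empty, w ∈ keys :=
        fun w hw => HT u w (hNedge w hw)
      -- the decrement pass
      obtain ⟨m1, m2⟩ := pvDec_spec (graph.getD u PySem.Set.empty) (HGnd u) indeg rest
        (fun w => ((keys.filter (fun c => pvEdge g CB c w && decide (c ∉ D))).length : Int)) inv7
      have hstep : pvKahn graph (fuel + 1) (u :: rest) indeg ((D.length : Int))
          = pvKahn graph fuel
              ((graph.getD u PySem.Set.empty).foldl pvDecStep (indeg, rest)).2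
              ((graph.getD u PySem.Set.empty).foldl pvDecStep (indeg, rest)).1
              ((D.length : Int) + 1) := by
        show pvKahn graph (fuel + 1) (u :: rest) indeg ((D.length : Int)) = _
        conv_lhs => rw [pvKahn]
        rfl
      -- count with u processed
      have hcount : ∀ w, pvEdge g CB u w = true →
          ((keys.filter (fun c => pvEdge g CB c w && decide (c ∉ D ++ [u]))).length : Int)
            = ((keys.filter (fun c => pvEdge g CB c w && decide (c ∉ D))).length : Int) - 1 := by
        intro w hw
        rw [pvFilter_sub (fun c => pvEdge g CB c w) D u hu.2 keys hknd hu.1, if_pos hw]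
      have hcount' : ∀ w, pvEdge g CB u w ≠ true →
          ((keys.filter (fun c => pvEdge g CB c w && decide (c ∉ D ++ [u]))).length : Int)
            = ((keys.filter (fun c => pvEdge g CB c w && decide (c ∉ D))).length : Int) := by
        intro w hw
        rw [pvFilter_sub (fun c => pvEdge g CB c w) D u hu.2 keys hknd hu.1, if_neg hw]
        ring
      -- the new invariant
      have hmemD' : ∀ x, x ∈ D ++ [u] ↔ (x ∈ D ∨ x = u) := by simp
      have hpdmono : ∀ v, pvPredsDone g CB D v → pvPredsDone g CB (D ++ [u]) v := by
        intro v h c hc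
        exact (hmemD' c).mpr (Or.inl (h c hc))
      -- membership in the newly enqueued part
      have hfiltN : ∀ v, v ∈ (graph.getD u PySem.Set.empty).filter
          (fun w => decide (((keys.filter (fun c => pvEdge g CB c w && decide (c ∉ D))).length : Int) - 1 = 0))
          ↔ (v ∈ graph.getD u PySem.Set.empty ∧
             ((keys.filter (fun c => pvEdge g CB c v && decide (c ∉ D))).length : Int) - 1 = 0) := by
        intro v
        rw [List.mem_filter]
        constructor
        · rintro ⟨h1, h2⟩
          exact ⟨h1, of_decide_eq_true h2⟩
        · rintro ⟨h1, h2⟩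
          exact ⟨h1, decide_eq_true h2⟩
      have hpdnew : ∀ v, v ∈ graph.getD u PySem.Set.empty →
          ((keys.filter (fun c => pvEdge g CB c v && decide (c ∉ D))).length : Int) - 1 = 0 →
          pvPredsDone g CB (D ++ [u]) v := by
        intro v hvN hcnt c hc
        by_contra hcD'
        have hcmem : c ∈ keys.filter (fun c => pvEdge g CB c v && decide (c ∉ D ++ [u])) := by
          rw [List.mem_filter]
          exact ⟨HK c v hc, by simp [hc, hcD']⟩
        have h0 : ((keys.filter (fun c => pvEdge g CB c v && decide (c ∉ D ++ [u]))).length : Int) = 0 := by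
          rw [hcount v (hNedge v hvN)]
          omega
        have : keys.filter (fun c => pvEdge g CB c v && decide (c ∉ D ++ [u])) = [] := by
          have : (keys.filter (fun c => pvEdge g CB c v && decide (c ∉ D ++ [u]))).length = 0 := by
            exact_mod_cast h0
          exact List.length_eq_zero_iff.mp this
        rw [this] at hcmem
        exact List.not_mem_nil hcmem
      have hinv' : pvInv g CB keys (D ++ [u])
          ((graph.getD u PySem.Set.empty).foldl pvDecStep (indeg, rest)).2
          ((graph.getD u PySem.Set.empty).foldl pvDecStep (indeg, rest)).1 := by
        rw [m2]
        refine ⟨?_, ?_, ?_, ?_, ?_, ?_, ?_⟩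
        · rw [List.nodup_append]
          exact ⟨inv1, List.nodup_singleton u, by
            intro a ha b hb heq
            rw [List.mem_singleton] at hb
            exact hu.2 ((heq.trans hb) ▸ ha)⟩
        · intro x hx
          rcases (hmemD' x).mp hx with h | rfl
          · exact inv2 x h
          · exact hu.1
        · rw [List.nodup_append]
          refine ⟨(List.nodup_cons.mp inv3).2, List.Nodup.filter _ (HGnd u), by
            intro a ha b hb heq
            exact F2 b (List.mem_filter.mp hb).1 (by simp [heq ▸ ha])⟩
        · intro q hq
          rcases List.mem_append.mp hq with h | h
          · have h4 := inv4 q (by simp [h])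
            refine ⟨h4.1, ?_⟩
            rw [hmemD']
            rintro (hD | rfl)
            · exact h4.2 hD
            · exact hurest h
          · have hqN := (List.mem_filter.mp h).1
            refine ⟨F3 q hqN, ?_⟩
            rw [hmemD']
            rintro (hD | rfl)
            · exact F1 q hqN hD
            · exact F0 q hqN rfl
        · intro v hv
          rcases (hmemD' v).mp hv with h | rfl
          · exact hpdmono v (inv5 v h)
          · exact hpdmono v hpdu
        · intro v hvk
          constructor
          · intro hvQ'
            rcases List.mem_append.mp hvQ' with h | h
            · have h6 := (inv6 v hvk).mp (by simp [h])
              refine ⟨?_, hpdmono v h6.2⟩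
              rw [hmemD']
              rintro (hD | rfl)
              · exact h6.1 hD
              · exact hurest h
            · obtain ⟨hvN, hcnt⟩ := (hfiltN v).mp h
              refine ⟨?_, hpdnew v hvN hcnt⟩
              rw [hmemD']
              rintro (hD | rfl)
              · exact F1 v hvN hD
              · exact F0 v hvN rfl
          · rintro ⟨hvD', hpd'⟩
            have hvD : v ∉ D := fun h => hvD' ((hmemD' v).mpr (Or.inl h))
            have hvu : v ≠ u := fun h => hvD' ((hmemD' v).mpr (Or.inr h))
            by_cases hpdD : pvPredsDone g CB D v
            · have : v ∈ u :: rest := (inv6 v hvk).mpr ⟨hvD, hpdD⟩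
              rcases List.mem_cons.mp this with rfl | h
              · exact absurd rfl hvu
              · exact List.mem_append.mpr (Or.inl h)
            · -- some predecessor of v is exactly u, so v is a neighbor newly at 0
              have hvN : v ∈ graph.getD u PySem.Set.empty := by
                unfold pvPredsDone at hpdD
                push Not at hpdD
                obtain ⟨c0, hc0e, hc0D⟩ := hpdD
                have hc0D' := hpd' c0 hc0e
                rcases (hmemD' c0).mp hc0D' with h | heq
                · exact absurd h hc0D
                · exact (HG u v).mpr (heq ▸ hc0e)
              have hedgeuv := hNedge v hvN
              refine List.mem_append.mpr (Or.inr ((hfiltN v).mpr ⟨hvN, ?_⟩))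
              have hempty : keys.filter (fun c => pvEdge g CB c v && decide (c ∉ D ++ [u])) = [] := by
                rw [List.eq_nil_iff_forall_not_mem]
                intro c hcmem
                obtain ⟨_, hcp⟩ := List.mem_filter.mp hcmem
                simp only [Bool.and_eq_true, decide_eq_true_eq] at hcp
                exact hcp.2 (hpd' c hcp.1)
              have := hcount v hedgeuv
              rw [hempty] at this
              simp only [List.length_nil, Nat.cast_zero] at this
              omega
        · intro w
          rw [m1 w]
          by_cases hw : pvEdge g CB u w = true
          · rw [if_pos ((HG u w).mpr hw), hcount w hw]
          · rw [if_neg (fun h => hw ((HG u w).mp h)), hcount' w hw]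
            ring
      -- fuel bookkeeping
      have hDlt : D.length < keys.length := by
        have hsub : (D ++ [u]).Subperm keys := by
          apply List.subperm_of_subset
          · rw [List.nodup_append]
            exact ⟨inv1, List.nodup_singleton u, by
              intro a ha b hb heq
              rw [List.mem_singleton] at hb
              exact hu.2 ((heq.trans hb) ▸ ha)⟩
          · intro x hx
            rcases List.mem_append.mp hx with h | h
            · exact inv2 x h
            · simp at h; subst h; exact hu.1
        have := hsub.length_le
        simp at this
        omega
      obtain ⟨Dfin, e1, e2, e3, e4, e5⟩ := ih
        ((graph.getD u PySem.Set.empty).foldl pvDecStep (indeg, rest)).2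
        ((graph.getD u PySem.Set.empty).foldl pvDecStep (indeg, rest)).1
        (D ++ [u]) hinv'
        (by simp only [List.length_append, List.length_cons, List.length_nil]; omega)
      refine ⟨Dfin, ?_, e2, e3, e4, ?_⟩
      · rw [hstep]
        have hlen : ((D ++ [u]).length : Int) = (D.length : Int) + 1 := by
          simp
        rw [← hlen]
        exact e1
      · intro S hS hDS hQS x hx
        refine e5 S hS ?_ ?_ x hx
        · intro y hy
          rcases List.mem_append.mp hy with h | h
          · exact hDS y h
          · have h' : y = u := List.mem_singleton.mp h
            subst h'
            exact hQS y (by simp)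
        · rw [m2]
          intro y hy
          rcases List.mem_append.mp hy with h | h
          · exact hQS y (by simp [h])
          · obtain ⟨hyN, hcnt⟩ := by
              rw [List.mem_filter] at h
              exact h
            have hyk := F3 y hyN
            apply hS y hyk
            intro c hc
            by_contra hcS
            have hcnt' : ((keys.filter (fun c => pvEdge g CB c y && decide (c ∉ D))).length : Int) - 1 = 0 :=
              of_decide_eq_true hcnt
            have hpd' := hpdnew y hyN hcnt'
            rcases (hmemD' c).mp (hpd' c hc) with hcm | rfl
            · exact hcS (hDS c hcm)
            · exact hcS (hQS c (by simp))
-- ---- B's saturation loop, characterized ----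

-- once the changed flag is set it stays set
lemma pvRound_snd_mono (g : List (List Int)) (items : List (Int × (Int × Int × Int × Int))) :
    ∀ (keys : List Int) (st : PySem.Set Int × Bool), st.2 = true →
    (keys.foldl (fun st v =>
      if v ∉ st.1 ∧ pvBlocked g items st.1 v = false then (st.1.add v, true) else st) st).2 = true := by
  intro keys
  induction keys with
  | nil => intro st h; exact h
  | cons v rest ih =>
    intro st h
    simp only [List.foldl_cons]
    by_cases hc : v ∉ st.1 ∧ pvBlocked g items st.1 v = false
    · rw [if_pos hc]; exact ih (st.1.add v, true) rfl
    · rw [if_neg hc]; exact ih _ h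

-- an unchanged round leaves done untouched and witnesses saturation
lemma pvRound_false (g : List (List Int)) (items : List (Int × (Int × Int × Int × Int))) :
    ∀ (keys : List Int) (st : PySem.Set Int × Bool),
    (keys.foldl (fun st v =>
      if v ∉ st.1 ∧ pvBlocked g items st.1 v = false then (st.1.add v, true) else st) st).2 = false →
    (keys.foldl (fun st v =>
      if v ∉ st.1 ∧ pvBlocked g items st.1 v = false then (st.1.add v, true) else st) st) = st
    ∧ ∀ v ∈ keys, ¬(v ∉ st.1 ∧ pvBlocked g items st.1 v = false) := by
  intro keys
  induction keys with
  | nil => intro st _; exact ⟨rfl, by simp⟩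
  | cons v rest ih =>
    intro st hfalse
    simp only [List.foldl_cons] at hfalse ⊢
    by_cases hc : v ∉ st.1 ∧ pvBlocked g items st.1 v = false
    · rw [if_pos hc] at hfalse
      have hmono := pvRound_snd_mono g items rest (st.1.add v, true) rfl
      rw [hfalse] at hmono
      cases hmono
    · rw [if_neg hc] at hfalse ⊢
      obtain ⟨h1, h2⟩ := ih st hfalse
      refine ⟨h1, ?_⟩
      intro w hw
      rcases List.mem_cons.mp hw with rfl | hw'
      · exact hc
      · exact h2 w hw'

-- structural facts about one round
lemma pvRound_basic (g : List (List Int)) (items : List (Int × (Int × Int × Int × Int)))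
    (keysAll : List Int) :
    ∀ (keys : List Int), (∀ v ∈ keys, v ∈ keysAll) →
    ∀ (st : PySem.Set Int × Bool), st.1.Nodup → (∀ x ∈ st.1, x ∈ keysAll) →
    ((keys.foldl (fun st v =>
      if v ∉ st.1 ∧ pvBlocked g items st.1 v = false then (st.1.add v, true) else st) st).1.Nodup)
    ∧ (∀ x ∈ (keys.foldl (fun st v =>
        if v ∉ st.1 ∧ pvBlocked g items st.1 v = false then (st.1.add v, true) else st) st).1, x ∈ keysAll)
    ∧ (∀ x ∈ st.1, x ∈ (keys.foldl (fun st v =>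
        if v ∉ st.1 ∧ pvBlocked g items st.1 v = false then (st.1.add v, true) else st) st).1)
    ∧ st.1.length ≤ (keys.foldl (fun st v =>
        if v ∉ st.1 ∧ pvBlocked g items st.1 v = false then (st.1.add v, true) else st) st).1.length
    ∧ ((keys.foldl (fun st v =>
        if v ∉ st.1 ∧ pvBlocked g items st.1 v = false then (st.1.add v, true) else st) st).2 = st.2
       ∨ st.1.length < (keys.foldl (fun st v =>
        if v ∉ st.1 ∧ pvBlocked g items st.1 v = false then (st.1.add v, true) else st) st).1.length) := by
  intro keys
  induction keys with
  | nil => intro _ st h1 h2; exact ⟨h1, h2, fun x hx => hx, le_refl _, Or.inl rfl⟩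
  | cons v rest ih =>
    intro hks st hnd hsub
    simp only [List.foldl_cons]
    by_cases hc : v ∉ st.1 ∧ pvBlocked g items st.1 v = false
    · rw [if_pos hc]
      have hadd : st.1.add v = st.1 ++ [v] := PySem.Set.add_of_not_mem hc.1
      have hlen : (st.1.add v).length = st.1.length + 1 := by rw [hadd]; simp
      obtain ⟨r1, r2, r3, r4, r5⟩ := ih (fun w hw => hks w (by simp [hw]))
        (st.1.add v, true) (PySem.Set.nodup_add _ _ hnd)
        (by
          intro x hx
          rcases (PySem.Set.mem_add _ _ _).mp hx with h | rfl
          · exact hsub x h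
          · exact hks x (by simp))
      dsimp only at r3 r4 r5
      rw [hlen] at r4
      refine ⟨r1, r2, ?_, by omega, Or.inr (by omega)⟩
      intro x hx
      exact r3 x ((PySem.Set.mem_add _ _ _).mpr (Or.inl hx))
    · rw [if_neg hc]
      exact ih (fun w hw => hks w (by simp [hw])) st hnd hsub

-- everything a round adds lies in any saturated superset of done
lemma pvRound_sub (g : List (List Int)) (CB : PySem.Dict Int (Int × Int × Int × Int))
    (hnd : CB.keys.Nodup) (S : List Int) (hS : pvClosed g CB CB.keys S) :
    ∀ (keys : List Int), (∀ v ∈ keys, v ∈ CB.keys) →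
    ∀ (st : PySem.Set Int × Bool), (∀ x ∈ st.1, x ∈ S) →
    ∀ x ∈ (keys.foldl (fun st v =>
      if v ∉ st.1 ∧ pvBlocked g CB.items st.1 v = false then (st.1.add v, true) else st) st).1, x ∈ S := by
  intro keys
  induction keys with
  | nil => intro _ st h; exact h
  | cons v rest ih =>
    intro hks st hsub
    simp only [List.foldl_cons]
    by_cases hc : v ∉ st.1 ∧ pvBlocked g CB.items st.1 v = false
    · rw [if_pos hc]
      apply ih (fun w hw => hks w (by simp [hw]))
      intro x hx
      rcases (PySem.Set.mem_add _ _ _).mp hx with h | rfl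
      · exact hsub x h
      · -- x is admitted: all its predecessors are in done ⊆ S, so x ∈ S
        have hpd : pvPredsDone g CB st.1 x := (pvBlocked_false_iff g CB hnd st.1 x).mp hc.2
        exact hS x (hks x (by simp)) (fun c hce => hsub c (hpd c hce))
    · rw [if_neg hc]
      exact ih (fun w hw => hks w (by simp [hw])) st hsub

lemma pvSaturate_spec (g : List (List Int)) (CB : PySem.Dict Int (Int × Int × Int × Int))
    (hnd : CB.keys.Nodup) :
    ∀ (fuel : Nat) (done : PySem.Set Int), done.Nodup → (∀ x ∈ done, x ∈ CB.keys) →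
    CB.keys.length - done.length < fuel →
    (pvSaturate g CB.items CB.keys fuel done).Nodup
    ∧ (∀ x ∈ pvSaturate g CB.items CB.keys fuel done, x ∈ CB.keys)
    ∧ pvClosed g CB CB.keys (pvSaturate g CB.items CB.keys fuel done)
    ∧ (∀ S, pvClosed g CB CB.keys S → (∀ x ∈ done, x ∈ S) →
        ∀ x ∈ pvSaturate g CB.items CB.keys fuel done, x ∈ S) := by
  intro fuel
  induction fuel with
  | zero => intro done _ _ h; omega
  | succ fuel ih =>
    intro done hdnd hdsub hfuel
    obtain ⟨r1, r2, r3, r4, r5⟩ := pvRound_basic g CB.items CB.keys CB.keys (fun v hv => hv)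
      (done, false) hdnd hdsub
    cases hr : (pvRound g CB.items CB.keys done).2 with
    | false =>
      obtain ⟨heq, hsat⟩ := pvRound_false g CB.items CB.keys (done, false) hr
      have hres : pvSaturate g CB.items CB.keys (fuel + 1) done = done := by
        show (if (pvRound g CB.items CB.keys done).2 = true then
            pvSaturate g CB.items CB.keys fuel (pvRound g CB.items CB.keys done).1
          else (pvRound g CB.items CB.keys done).1) = done
        rw [hr]
        simp only [Bool.false_eq_true, if_false]
        have heq' : pvRound g CB.items CB.keys done = (done, false) := heq
        rw [heq']
      rw [hres]
      refine ⟨hdnd, hdsub, ?_, fun S _ hsub x hx => hsub x hx⟩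
      intro v hv hpd
      by_contra hvd
      exact (hsat v hv) ⟨hvd, (pvBlocked_false_iff g CB hnd done v).mpr hpd⟩
    | true =>
      have hgrow : done.length < (pvRound g CB.items CB.keys done).1.length := by
        rcases r5 with h | h
        · have h' : (pvRound g CB.items CB.keys done).2 = false := h
          rw [h'] at hr
          cases hr
        · exact h
      have hsublen : (pvRound g CB.items CB.keys done).1.length ≤ CB.keys.length :=
        (List.subperm_of_subset r1 r2).length_le
      obtain ⟨s1, s2, s3, s4⟩ := ih (pvRound g CB.items CB.keys done).1 r1 r2 (by omega)
      have hres : pvSaturate g CB.items CB.keys (fuel + 1) done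
          = pvSaturate g CB.items CB.keys fuel (pvRound g CB.items CB.keys done).1 := by
        show (if (pvRound g CB.items CB.keys done).2 = true then
            pvSaturate g CB.items CB.keys fuel (pvRound g CB.items CB.keys done).1
          else (pvRound g CB.items CB.keys done).1) = _
        rw [hr]
        simp
      rw [hres]
      refine ⟨s1, s2, s3, ?_⟩
      intro S hS hsub x hx
      refine s4 S hS ?_ x hx
      exact pvRound_sub g CB hnd S hS CB.keys (fun v hv => hv) (done, false) hsub

-- ===== VERDICT (by name: the statement is the Claim_ definition above) =====
-- the two filters agree when nothing is processed yet
lemma pvFilter_nilD (g : List (List Int)) (CB : PySem.Dict Int (Int × Int × Int × Int))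
    (keys : List Int) (w : Int) :
    keys.filter (fun c => pvEdge g CB c w && decide (c ∉ ([] : List Int)))
      = keys.filter (fun c => pvEdge g CB c w) := by
  apply List.filter_congr
  intro c _
  simp

theorem isPrintable_topological_sort_spec : Claim_equal_isPrintable_topological_sort := by
  intro tg hdom hpre
  unfold Spec_isPrintable_topological_sort
  unfold isPrintable_topological_sort isPrintable_topological_sort_alt
  by_cases hguard : tg = [] ∨ tg.headD [] = []
  · rw [if_pos hguard, if_pos hguard]
  · rw [if_neg hguard, if_neg hguard]
    dsimp only
    rw [pvBounds_eq]
    set CB := pvBoundsA tg (tg.length : Int) ((tg.headD []).length : Int) with hCBdef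
    have hnd : CB.keys.Nodup := pvBoundsA_keys_nodup tg _ _
    have hofl : PySem.Set.ofList CB.keys = CB.keys := pvSet_ofList_eq_self _ hnd
    rw [hofl]
    set ind0 := CB.keys.foldl (fun d c => d.insert c (0 : Int)) PySem.Dict.empty with hind0def
    have h0 : ∀ w, ind0.getD w 0 = 0 := fun w => pvInd0_getD CB.keys w
    obtain ⟨HG, HGnd, Hdeg⟩ := pvGraphA_spec tg CB ind0 hnd h0
    have HK : ∀ c w, pvEdge tg CB c w = true → c ∈ CB.keys := fun c w h => pvEdge_mem_keys h
    have HT : ∀ c w, pvEdge tg CB c w = true → w ∈ CB.keys := by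
      intro c w h
      rw [hCBdef] at h ⊢
      exact pvEdge_target_mem_keys tg _ _ h
    rw [pvQueue0_eq CB.keys (pvGraphA tg CB ind0).2]
    set Q0 := CB.keys.filter (fun c => decide ((pvGraphA tg CB ind0).2.getD c 0 = 0)) with hQ0def
    have hinv : pvInv tg CB CB.keys [] Q0 (pvGraphA tg CB ind0).2 := by
      refine ⟨List.nodup_nil, by simp, hnd.filter _, ?_, by simp, ?_, ?_⟩
      · intro q hq
        rw [hQ0def, List.mem_filter] at hq
        exact ⟨hq.1, by simp⟩
      · intro v hv
        rw [hQ0def, List.mem_filter]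
        constructor
        · rintro ⟨-, hq⟩
          have h0' : ((CB.keys.filter (fun c => pvEdge tg CB c v)).length : Int) = 0 := by
            rw [← Hdeg v]
            exact of_decide_eq_true hq
          have hnil : CB.keys.filter (fun c => pvEdge tg CB c v) = [] :=
            List.length_eq_zero_iff.mp (by exact_mod_cast h0')
          refine ⟨by simp, ?_⟩
          intro c hc
          exfalso
          have hmem : c ∈ CB.keys.filter (fun c => pvEdge tg CB c v) :=
            List.mem_filter.mpr ⟨HK c v hc, hc⟩
          rw [hnil] at hmem
          exact List.not_mem_nil hmem
        · rintro ⟨-, hpd⟩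
          refine ⟨hv, decide_eq_true ?_⟩
          rw [Hdeg v]
          have hnil : CB.keys.filter (fun c => pvEdge tg CB c v) = [] := by
            rw [List.eq_nil_iff_forall_not_mem]
            intro c hcmem
            exact List.not_mem_nil (hpd c (List.mem_filter.mp hcmem).2)
          rw [hnil]
          simp
      · intro w
        rw [Hdeg w, pvFilter_nilD]
    obtain ⟨Dfin, e1, e2, e3, e4, e5⟩ := pvKahn_spec tg CB CB.keys (pvGraphA tg CB ind0).1 hnd
      HG HGnd HK HT (CB.keys.length + 1) Q0 (pvGraphA tg CB ind0).2 [] hinv (by simp)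
    simp only [List.length_nil, Nat.cast_zero] at e1
    obtain ⟨s1, s2, s3, s4⟩ := pvSaturate_spec tg CB hnd (CB.keys.length + 1) PySem.Set.empty
      (by simp [PySem.Set.empty]) (by simp [PySem.Set.empty])
      (by simp only [PySem.Set.empty, List.length_nil, Nat.sub_zero]; omega)
    have inv6 := hinv.2.2.2.2.2.1
    have hDR : ∀ x ∈ Dfin,
        x ∈ pvSaturate tg CB.items CB.keys (CB.keys.length + 1) PySem.Set.empty := by
      refine e5 _ s3 (by simp) ?_
      intro q hq
      have hqk : q ∈ CB.keys := by
        rw [hQ0def] at hq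
        exact (List.mem_filter.mp hq).1
      have hpd := ((inv6 q hqk).mp hq).2
      exact s3 q hqk (fun c hc => (List.not_mem_nil (hpd c hc)).elim)
    have hRD : ∀ x ∈ pvSaturate tg CB.items CB.keys (CB.keys.length + 1) PySem.Set.empty,
        x ∈ Dfin := s4 Dfin e4 (by simp [PySem.Set.empty])
    have hlen : Dfin.length
        = (pvSaturate tg CB.items CB.keys (CB.keys.length + 1) PySem.Set.empty).length :=
      Nat.le_antisymm (List.subperm_of_subset e2 hDR).length_le
        (List.subperm_of_subset s1 hRD).length_le
    rw [e1, hlen]
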